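-- pv_equiv track=rewrite | github.com/asweigart/programmedpatterns | book/visualpatterns.py | pattern23
-- ===== SOURCE A (Python) =====
-- def pattern23(step):
--     pattern = 'O'
--     i = 2
--     while True:
--         if i > step:
--             break
--         pattern += 'O'
--         i += 1
--
--         if i > step:
--             break
--         pattern += 'OO'
--         i += 1
--     return pattern
-- ===== SOURCE B (Python) =====
-- def pattern23(step):
--     # Closed form: the loop appends 'O' for each i in 2..step, 1 char at even
--     # loop positions (i = 2, 4, ...) and 2 chars at odd positions (i = 3, 5, ...).
--     if step < 2:
--         return 'O'
--     evens = step // 2            # count of even i in 2..step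
--     odds = (step - 1) - evens    # count of odd i in 3..step
--     return 'O' * (1 + evens + 2 * odds)
-- ===== Notes on version B (the rewrite author's own statement) =====
-- stated objective: faster
-- what changed: Replaces the character-by-character accumulation loop with a closed-form count (evens/odds in 2..step) and a single string repetition.
import Mathlib
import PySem

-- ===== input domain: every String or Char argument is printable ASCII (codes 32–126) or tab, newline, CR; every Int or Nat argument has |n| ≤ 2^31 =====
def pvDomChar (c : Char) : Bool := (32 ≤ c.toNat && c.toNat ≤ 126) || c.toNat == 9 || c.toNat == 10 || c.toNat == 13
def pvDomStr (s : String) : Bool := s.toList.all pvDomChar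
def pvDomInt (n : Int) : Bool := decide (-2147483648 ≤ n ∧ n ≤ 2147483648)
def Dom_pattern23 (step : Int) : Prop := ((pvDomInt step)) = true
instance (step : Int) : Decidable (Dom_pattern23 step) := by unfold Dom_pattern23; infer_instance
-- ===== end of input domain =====

-- B computes the output length in closed form and allocates once (faster); A appends per loop step.
-- ===== PORT A =====
def pattern23Loop (step : Int) (i : Int) (pattern : String) : String :=
  if i > step then pattern
  else
    -- pattern += 'O'; i += 1
    if i + 1 > step then pattern ++ "O"
    else pattern23Loop step (i + 2) (pattern ++ "O" ++ "OO")
termination_by (step - i).toNat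
decreasing_by omega

def pattern23 (step : Int) : String := pattern23Loop step 2 "O"

-- ===== PORT B =====
def pattern23_alt (step : Int) : String :=
  if step < 2 then "O"
  else
    let evens := PySem.Int.floordiv step 2
    let odds := (step - 1) - evens
    String.ofList (List.replicate (1 + evens + 2 * odds).toNat 'O')

-- ===== PRECONDITION & SPEC =====
def Spec_pattern23 (step : Int) (out : String) : Prop := out = pattern23_alt step
instance (step : Int) (out : String) : Decidable (Spec_pattern23 step out) := by unfold Spec_pattern23; infer_instance

-- ===== CLAIM (what is proved, stated in full; the proofs are below) =====
def Claim_equal_pattern23 : Prop := ∀ (step : Int), Dom_pattern23 step → Spec_pattern23 step (pattern23 step)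

-- ===== LEMMAS AND PROOFS =====

-- The loop starting at position i appends 3*(k/2) + k%2 copies of 'O',
-- where k = (step + 1 - i).toNat is the number of loop positions left.
theorem ofList_O_cons (c : Char) (n : Nat) :
    String.ofList [c] ++ String.ofList (List.replicate n c)
      = String.ofList (List.replicate (n + 1) c) := by
  rw [← String.ofList_append]
  simp [List.replicate_succ]

theorem oneO (n : Nat) :
    ("O" : String) ++ String.ofList (List.replicate n 'O')
      = String.ofList (List.replicate (n + 1) 'O') := by
  have h : ("O" : String) = String.ofList ['O'] := by decide
  rw [h, ofList_O_cons]

theorem twoO (n : Nat) :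
    ("OO" : String) ++ String.ofList (List.replicate n 'O')
      = String.ofList (List.replicate (n + 2) 'O') := by
  have h : ("OO" : String) = String.ofList ['O'] ++ String.ofList ['O'] := by decide
  rw [h, String.append_assoc, ofList_O_cons, ofList_O_cons]

theorem pattern23Loop_eq (step i : Int) (p : String) :
    pattern23Loop step i p =
      p ++ String.ofList (List.replicate
        (3 * ((step + 1 - i).toNat / 2) + (step + 1 - i).toNat % 2) 'O') := by
  fun_induction pattern23Loop step i p with
  | case1 i p h =>
      have : (step + 1 - i).toNat = 0 := by omega
      simp [this]
  | case2 i p h h2 =>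
      have h1 : (step + 1 - i).toNat = 1 := by omega
      have h0 : ("O" : String) = String.ofList (List.replicate 1 'O') := by decide
      rw [h1]
      conv_lhs => rw [h0]
  | case3 i p h h2 ih =>
      rw [ih]
      have hk : (step + 1 - (i + 2)).toNat = (step + 1 - i).toNat - 2 := by omega
      have h2le : 2 ≤ (step + 1 - i).toNat := by omega
      rw [hk, String.append_assoc, String.append_assoc, twoO, oneO]
      have harith : 3 * (((step + 1 - i).toNat - 2) / 2) + ((step + 1 - i).toNat - 2) % 2 + 2 + 1
          = 3 * ((step + 1 - i).toNat / 2) + (step + 1 - i).toNat % 2 := by omega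
      rw [harith]

-- ===== VERDICT (by name: the statement is the Claim_ definition above) =====
theorem pattern23_spec : Claim_equal_pattern23 := by
  intro step _
  unfold Spec_pattern23 pattern23 pattern23_alt
  rw [pattern23Loop_eq]
  by_cases h : step < 2
  · have : (step + 1 - 2).toNat = 0 := by omega
    simp [this, h]
  · simp only [h, if_false]
    have hfd : PySem.Int.floordiv step 2 = step / 2 :=
      PySem.Int.floordiv_eq_ediv_of_pos (by omega)
    rw [hfd]
    rw [oneO]
    have harith : 3 * ((step + 1 - 2).toNat / 2) + (step + 1 - 2).toNat % 2 + 1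
        = (1 + step / 2 + 2 * (step - 1 - step / 2)).toNat := by omega
    rw [harith]
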